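-- pv_equiv track=rewrite | github.com/solandr/my-python-use-samples | F99_TS_3.py | prep_ts_data
-- ===== SOURCE A (Python) =====
-- def prep_ts_data(rows, dn, ind_dat, ind_kod, ind_br):
--     rd = {}
--     dni = dn.items()
--     for cols in rows:
--         shipment_date = cols[ind_dat]
--         shipment_dict = rd.get(shipment_date, None)
--         if (shipment_dict == None):
--             shipment_dict = {}
--             rd[shipment_date] = shipment_dict
--         articule = cols[ind_kod]
--         good_row = {}
--         for (k, v) in dni:
--             if v != ind_br:
--                 good_row[k] = cols[v]
--             else:
--                 good_row[k] = "LADA"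
--         shipment_dict[articule] = good_row
--     return rd
-- ===== SOURCE B (Python) =====
-- def prep_ts_data(rows, dn, ind_dat, ind_kod, ind_br):
--     dates = list(dict.fromkeys(cols[ind_dat] for cols in rows))
--     def make_row(cols):
--         return {k: ("LADA" if v == ind_br else cols[v]) for k, v in dn.items()}
--     return {d: {cols[ind_kod]: make_row(cols) for cols in rows if cols[ind_dat] == d}
--             for d in dates}
-- ===== Notes on version B (the rewrite author's own statement) =====
-- stated objective: alternative
-- what changed: Replaced A's single mutating pass (get-or-create inner dict per row, per-item LADA branch inside the row loop) by a declarative two-phase grouping: dedup the dates once, then build the whole nested dict with comprehensions that filter the rows per date.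
import Mathlib
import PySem

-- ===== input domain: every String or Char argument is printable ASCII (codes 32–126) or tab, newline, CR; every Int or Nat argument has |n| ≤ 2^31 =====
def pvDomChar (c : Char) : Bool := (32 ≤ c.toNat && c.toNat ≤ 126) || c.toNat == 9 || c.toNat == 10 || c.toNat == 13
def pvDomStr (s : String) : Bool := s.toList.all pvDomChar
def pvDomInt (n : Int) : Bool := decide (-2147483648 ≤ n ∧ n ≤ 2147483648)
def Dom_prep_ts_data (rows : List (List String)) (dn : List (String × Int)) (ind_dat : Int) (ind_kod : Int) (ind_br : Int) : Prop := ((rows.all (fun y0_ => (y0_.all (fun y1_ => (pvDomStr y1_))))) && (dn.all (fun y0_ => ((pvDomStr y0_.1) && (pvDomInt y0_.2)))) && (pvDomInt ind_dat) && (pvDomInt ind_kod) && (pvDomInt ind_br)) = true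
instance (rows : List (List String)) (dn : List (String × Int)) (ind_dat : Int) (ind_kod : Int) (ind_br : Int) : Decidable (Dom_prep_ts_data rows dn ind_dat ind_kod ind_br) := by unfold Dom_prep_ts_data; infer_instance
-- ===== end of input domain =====

-- B replaces A's single mutating pass by a declarative two-phase grouping (dedup dates, then per-date filtered comprehensions); same values, no speed claim.


-- ===== PORT A =====
-- good_row = {}; for (k,v) in dn.items(): good_row[k] = cols[v] if v != ind_br else "LADA"
def pvRowA (dn : List (String × Int)) (ind_br : Int) (cols : List String) : List (String × String) :=
  (dn.foldl (fun g kv => g.insert kv.1 (if kv.2 ≠ ind_br then PySem.List.pyGetD cols kv.2 "" else "LADA")) PySem.Dict.empty).items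

def prep_ts_data (rows : List (List String)) (dn : List (String × Int)) (ind_dat : Int) (ind_kod : Int) (ind_br : Int) : List (String × List (String × List (String × String))) :=
  -- rd.get(date) or fresh {}, mutate it with articule→good_row, write back at the same key (insert overwrites in place)
  (rows.foldl
    (fun rd cols =>
      rd.insert (PySem.List.pyGetD cols ind_dat "")
        ((rd.getD (PySem.List.pyGetD cols ind_dat "") PySem.Dict.empty).insert
          (PySem.List.pyGetD cols ind_kod "") (pvRowA dn ind_br cols)))
    PySem.Dict.empty).items.map (fun p => (p.1, p.2.items))

-- ===== PORT B =====
-- make_row(cols) = {k: "LADA" if v == ind_br else cols[v] for k, v in dn.items()}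
def pvRowB (dn : List (String × Int)) (ind_br : Int) (cols : List String) : List (String × String) :=
  (dn.foldl (fun g kv => g.insert kv.1 (if kv.2 == ind_br then "LADA" else PySem.List.pyGetD cols kv.2 "")) PySem.Dict.empty).items

-- {cols[ind_kod]: make_row(cols) for cols in rows if cols[ind_dat] == d}
def pvInnerB (rows : List (List String)) (dn : List (String × Int)) (ind_dat : Int) (ind_kod : Int) (ind_br : Int) (d : String) : List (String × List (String × String)) :=
  (rows.foldl
    (fun m cols =>
      if PySem.List.pyGetD cols ind_dat "" == d then
        m.insert (PySem.List.pyGetD cols ind_kod "") (pvRowB dn ind_br cols)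
      else m)
    PySem.Dict.empty).items

def prep_ts_data_alt (rows : List (List String)) (dn : List (String × Int)) (ind_dat : Int) (ind_kod : Int) (ind_br : Int) : List (String × List (String × List (String × String))) :=
  -- dates = list(dict.fromkeys(cols[ind_dat] for cols in rows)); {d: inner(d) for d in dates}
  ((PySem.List.dedup (rows.map (fun cols => PySem.List.pyGetD cols ind_dat ""))).foldl
    (fun acc d => acc.insert d (pvInnerB rows dn ind_dat ind_kod ind_br d))
    PySem.Dict.empty).items

-- ===== PRECONDITION & SPEC =====
-- Pre_ excludes exactly the inputs where Python A raises IndexError: some row too short for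
-- ind_dat, ind_kod, or a non-LADA column index of the (deduplicated, as a Python dict) dn.
def Pre_prep_ts_data (rows : List (List String)) (dn : List (String × Int)) (ind_dat : Int) (ind_kod : Int) (ind_br : Int) : Prop :=
  ∀ cols ∈ rows, PySem.Raise.InRange cols.length ind_dat ∧ PySem.Raise.InRange cols.length ind_kod ∧
    ∀ kv ∈ (PySem.Dict.ofList dn).items, kv.2 ≠ ind_br → PySem.Raise.InRange cols.length kv.2
instance (rows : List (List String)) (dn : List (String × Int)) (ind_dat : Int) (ind_kod : Int) (ind_br : Int) : Decidable (Pre_prep_ts_data rows dn ind_dat ind_kod ind_br) := by unfold Pre_prep_ts_data; infer_instance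

def pvWitness_prep_ts_data : List (List String) × (List (String × Int)) × Int × Int × Int :=
  ([["2021-01-05", "A7", "3"], ["2021-01-05", "B2", "5"]], [("kod", 1), ("qty", 2), ("brand", 9)], 0, 1, 9)

def Spec_prep_ts_data (rows : List (List String)) (dn : List (String × Int)) (ind_dat : Int) (ind_kod : Int) (ind_br : Int) (out : List (String × List (String × List (String × String)))) : Prop := out = prep_ts_data_alt rows dn ind_dat ind_kod ind_br
instance (rows : List (List String)) (dn : List (String × Int)) (ind_dat : Int) (ind_kod : Int) (ind_br : Int) (out : List (String × List (String × List (String × String)))) : Decidable (Spec_prep_ts_data rows dn ind_dat ind_kod ind_br out) := by unfold Spec_prep_ts_data; infer_instance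

-- ===== CLAIM (what is proved, stated in full; the proofs are below) =====
def Claim_equal_prep_ts_data : Prop := ∀ (rows : List (List String)) (dn : List (String × Int)) (ind_dat : Int) (ind_kod : Int) (ind_br : Int), Dom_prep_ts_data rows dn ind_dat ind_kod ind_br → Pre_prep_ts_data rows dn ind_dat ind_kod ind_br → Spec_prep_ts_data rows dn ind_dat ind_kod ind_br (prep_ts_data rows dn ind_dat ind_kod ind_br)

-- ===== LEMMAS AND PROOFS =====

-- the two row builders agree (the if-branches are each other's mirror image)
theorem pvRow_eq (dn : List (String × Int)) (ind_br : Int) (cols : List String) :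
    pvRowA dn ind_br cols = pvRowB dn ind_br cols := by
  unfold pvRowA pvRowB
  have h : (fun (g : PySem.Dict String String) (kv : String × Int) =>
        g.insert kv.1 (if kv.2 ≠ ind_br then PySem.List.pyGetD cols kv.2 "" else "LADA"))
      = (fun g kv => g.insert kv.1 (if kv.2 == ind_br then "LADA" else PySem.List.pyGetD cols kv.2 "")) := by
    funext g kv
    by_cases h : kv.2 = ind_br <;> simp [h]
  rw [h]

-- a conditional insert loop is the filtered loop
theorem foldl_ite_filter {α ν : Type} (p : α → Bool) (f : PySem.Dict String ν → α → PySem.Dict String ν)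
    (l : List α) (init : PySem.Dict String ν) :
    l.foldl (fun m x => if p x then f m x else m) init = (l.filter p).foldl f init := by
  induction l generalizing init with
  | nil => rfl
  | cons x xs ih =>
    by_cases h : p x <;> simp [h, ih]

-- the per-date content of A's accumulating fold is the fold over the rows filtered to that date
theorem getD_grp {ν : Type} (key : List String → String) (art : List String → String)
    (row : List String → ν) (rows : List (List String)) (d : String)
    (rd : PySem.Dict String (PySem.Dict String ν)) :
    (rows.foldl (fun rd cols => rd.insert (key cols)
        ((rd.getD (key cols) PySem.Dict.empty).insert (art cols) (row cols))) rd).getD d PySem.Dict.empty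
      = (rows.filter (fun c => key c == d)).foldl (fun m c => m.insert (art c) (row c))
          (rd.getD d PySem.Dict.empty) := by
  induction rows generalizing rd with
  | nil => rfl
  | cons c cs ih =>
    simp only [List.foldl_cons, List.filter_cons]
    by_cases h : key c = d
    · subst h
      simp [ih]
    · have hb : (key c == d) = false := by simp [h]
      rw [hb]
      simp only [Bool.false_eq_true, if_false]
      rw [ih, PySem.Dict.getD_insert, if_neg (fun hdk : d = key c => h hdk.symm)]

-- ===== VERDICT (by name: the statement is the Claim_ definition above) =====
theorem prep_ts_data_spec : Claim_equal_prep_ts_data := by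
  intro rows dn ind_dat ind_kod ind_br _ _
  unfold Spec_prep_ts_data prep_ts_data prep_ts_data_alt
  set key : List String → String := fun cols => PySem.List.pyGetD cols ind_dat "" with hkey
  set art : List String → String := fun cols => PySem.List.pyGetD cols ind_kod "" with hart
  set rdA := rows.foldl (fun rd cols => rd.insert (key cols)
      ((rd.getD (key cols) PySem.Dict.empty).insert (art cols) (pvRowA dn ind_br cols)))
      PySem.Dict.empty with hrdA
  -- A's keys are the deduped dates
  have hkeys : rdA.keys = PySem.List.dedup (rows.map key) := by
    rw [hrdA, PySem.Dict.keys_foldl_insert_key]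
    simp [PySem.Set.update_nil_left]
  have hnodup : rdA.keys.Nodup := by
    rw [hkeys]; exact PySem.List.nodup_dedup _
  -- A's items as a map over its keys
  rw [PySem.Dict.items_eq_map_keys rdA hnodup PySem.Dict.empty, hkeys, List.map_map]
  -- B's outer dict: fold over distinct fresh keys appends
  have hB := PySem.Dict.items_foldl_insert_fresh
      (PySem.List.dedup (rows.map key)) (fun d => d)
      (fun d => pvInnerB rows dn ind_dat ind_kod ind_br d) PySem.Dict.empty
      (fun a _ => PySem.Dict.contains_empty a)
      (by simp)
  have he : (PySem.Dict.empty : PySem.Dict String (List (String × List (String × String)))).items = [] := rfl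
  rw [hB, he, List.nil_append]
  apply List.map_congr_left
  intro d _
  simp only [Function.comp_apply]
  congr 1
  -- per-date values agree
  have hg := getD_grp key art (pvRowA dn ind_br) rows d PySem.Dict.empty
  rw [hrdA, hg, PySem.Dict.getD_empty]
  unfold pvInnerB
  rw [foldl_ite_filter (fun cols => PySem.List.pyGetD cols ind_dat "" == d)
      (fun m cols => m.insert (PySem.List.pyGetD cols ind_kod "") (pvRowB dn ind_br cols)) rows PySem.Dict.empty]
  have hrow : (fun (m : PySem.Dict String (List (String × String))) c => m.insert (art c) (pvRowA dn ind_br c))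
      = (fun (m : PySem.Dict String (List (String × String))) cols => m.insert (PySem.List.pyGetD cols ind_kod "") (pvRowB dn ind_br cols)) := by
    funext m c
    rw [pvRow_eq, hart]
  rw [hkey, hart, hrow]
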